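-- pv_equiv track=rewrite | github.com/eerytea/d20-fight-club | core/standings.py | _group_h2h_rankings
-- ===== SOURCE A (Python) =====
-- from typing import Dict, Tuple, List
--
-- H2HMap = Dict[Tuple[int, int], Dict[str, int]]  # (A,B) -> {a_gf, a_ga, a_pts, b_pts}
--
-- def _h2h_points_for(a: int, b: int, h2h: H2HMap) -> int:
--     """Total points team a earned vs team b across all meetings (home/away)."""
--     pts = 0
--     rec_ab = h2h.get((a, b))
--     if rec_ab:
--         pts += int(rec_ab.get("a_pts", 0))
--     rec_ba = h2h.get((b, a))
--     if rec_ba: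
--         pts += int(rec_ba.get("b_pts", 0))  # when b was 'a' in that key, 'b_pts' are a's points
--     return pts
--
-- def _group_h2h_rankings(tids: List[int], h2h: H2HMap) -> Dict[int, int]:
--     """
--     For a tied group, compute head-to-head points each team earned against
--     other teams in the same group. Higher is better.
--     """
--     scores: Dict[int, int] = {tid: 0 for tid in tids}
--     for i, a in enumerate(tids):
--         for b in tids:
--             if a == b:
--                 continue
--             scores[a] += _h2h_points_for(a, b, h2h)
--     return scores
-- ===== SOURCE B (Python) =====
-- def _group_h2h_rankings(tids, h2h):
--     """
--     Head-to-head points per tied team, by a single pass over the h2h map: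
--     each record (a, b) grants its a_pts to a and its b_pts to b when both
--     teams are in the group. O(n + |h2h|) instead of scanning h2h per pair.
--     """
--     scores = {tid: 0 for tid in tids}
--     group = set(tids)
--     for (x, y), rec in h2h.items():
--         if x in group and y in group and x != y:
--             scores[x] += int(rec.get("a_pts", 0))
--             scores[y] += int(rec.get("b_pts", 0))
--     return scores
-- ===== Notes on version B (the rewrite author's own statement) =====
-- stated objective: faster
-- what changed: Instead of scanning for every ordered pair of tied teams and looking each pair up in the h2h dict (O(n^2) lookups), B makes a single pass over the h2h entries, crediting a_pts/b_pts to the two teams when both lie in the group set.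
-- outside the precondition, e.g. on _group_h2h_rankings([1, 2, 2], {(1, 2): {'a_pts': 3}}): A returns {1: 6, 2: 0}, B returns {1: 3, 2: 0}
import Mathlib
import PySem

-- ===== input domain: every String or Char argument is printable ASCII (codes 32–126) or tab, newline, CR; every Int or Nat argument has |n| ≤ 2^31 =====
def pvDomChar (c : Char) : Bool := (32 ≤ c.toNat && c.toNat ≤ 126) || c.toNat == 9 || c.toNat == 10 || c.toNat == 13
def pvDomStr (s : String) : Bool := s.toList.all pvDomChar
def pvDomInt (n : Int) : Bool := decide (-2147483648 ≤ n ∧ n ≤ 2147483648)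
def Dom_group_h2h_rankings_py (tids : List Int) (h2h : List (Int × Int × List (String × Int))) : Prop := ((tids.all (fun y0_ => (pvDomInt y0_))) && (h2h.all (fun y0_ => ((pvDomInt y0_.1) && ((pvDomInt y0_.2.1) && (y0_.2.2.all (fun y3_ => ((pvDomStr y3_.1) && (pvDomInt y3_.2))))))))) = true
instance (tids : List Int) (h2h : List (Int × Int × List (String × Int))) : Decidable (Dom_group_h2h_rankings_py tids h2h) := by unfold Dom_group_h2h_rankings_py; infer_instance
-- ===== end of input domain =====

-- B replaces A's per-pair scan of the h2h dict by a single pass over the h2h entries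
-- attributing a_pts/b_pts to teams inside the group set (asymptotically faster).


-- ===== PORT A =====
-- h2h.get((a, b)) : first-match lookup on the key pair (exact for a Python dict,
-- whose keys are unique; Pre_ keeps the assoc-list representation unique-keyed too).
def pvH2hGet? (h2h : List (Int × Int × List (String × Int))) (a b : Int) :
    Option (List (String × Int)) :=
  match h2h with
  | [] => none
  | (x, y, r) :: rest => if x = a ∧ y = b then some r else pvH2hGet? rest a b

-- _h2h_points_for; `if rec:` is the emptiness test (None / {} falsy)
def pvH2hPointsFor (a b : Int) (h2h : List (Int × Int × List (String × Int))) : Int :=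
  let pts : Int := 0
  let pts := match pvH2hGet? h2h a b with
    | some r => if r ≠ [] then pts + (PySem.Dict.mk r).getD "a_pts" 0 else pts
    | none => pts
  let pts := match pvH2hGet? h2h b a with
    | some r => if r ≠ [] then pts + (PySem.Dict.mk r).getD "b_pts" 0 else pts
    | none => pts
  pts

def group_h2h_rankings_py (tids : List Int) (h2h : List (Int × Int × List (String × Int))) : List (Int × Int) :=
  let scores : PySem.Dict Int Int := tids.foldl (fun d t => d.insert t 0) PySem.Dict.empty
  let scores := tids.foldl (fun sc a =>
    tids.foldl (fun sc b =>
      if a = b then sc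
      else sc.insert a (sc.getD a 0 + pvH2hPointsFor a b h2h)) sc) scores
  scores.items

-- ===== PORT B =====
def group_h2h_rankings_py_alt (tids : List Int) (h2h : List (Int × Int × List (String × Int))) : List (Int × Int) :=
  let scores : PySem.Dict Int Int := tids.foldl (fun d t => d.insert t 0) PySem.Dict.empty
  let group : PySem.Set Int := PySem.Set.ofList tids
  let scores := h2h.foldl (fun sc e =>
    if e.1 ∈ group ∧ e.2.1 ∈ group ∧ e.1 ≠ e.2.1 then
      let sc := sc.insert e.1 (sc.getD e.1 0 + (PySem.Dict.mk e.2.2).getD "a_pts" 0)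
      sc.insert e.2.1 (sc.getD e.2.1 0 + (PySem.Dict.mk e.2.2).getD "b_pts" 0)
    else sc) scores
  scores.items

-- ===== PRECONDITION & SPEC =====
-- Pre_ excludes (1) duplicate (a, b) key pairs in the h2h assoc list, which cannot
-- arise from a Python dict; and (2) duplicate entries in tids when some h2h entry
-- pairs two distinct members of the group (only then can scores be nonzero): there
-- A's per-occurrence loops multiply a team's points by the multiplicities — an
-- accident of iterating the list rather than the group — while B counts each
-- pairing once.
def Pre_group_h2h_rankings_py (tids : List Int) (h2h : List (Int × Int × List (String × Int))) : Prop :=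
  (h2h.map (fun e => (e.1, e.2.1))).Nodup ∧
  (tids.Nodup ∨ ∀ e ∈ h2h, ¬(e.1 ∈ tids ∧ e.2.1 ∈ tids ∧ e.1 ≠ e.2.1))
instance (tids : List Int) (h2h : List (Int × Int × List (String × Int))) : Decidable (Pre_group_h2h_rankings_py tids h2h) := by unfold Pre_group_h2h_rankings_py; infer_instance

def pvWitness_group_h2h_rankings_py : List Int × (List (Int × Int × List (String × Int))) :=
  ([1, 2], [(1, 2, [("a_pts", 3), ("b_pts", 1)])])

def Spec_group_h2h_rankings_py (tids : List Int) (h2h : List (Int × Int × List (String × Int))) (out : List (Int × Int)) : Prop := out = group_h2h_rankings_py_alt tids h2h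
instance (tids : List Int) (h2h : List (Int × Int × List (String × Int))) (out : List (Int × Int)) : Decidable (Spec_group_h2h_rankings_py tids h2h out) := by unfold Spec_group_h2h_rankings_py; infer_instance

-- ===== CLAIM (what is proved, stated in full; the proofs are below) =====
def Claim_equal_group_h2h_rankings_py : Prop := ∀ (tids : List Int) (h2h : List (Int × Int × List (String × Int))), Dom_group_h2h_rankings_py tids h2h → Pre_group_h2h_rankings_py tids h2h → Spec_group_h2h_rankings_py tids h2h (group_h2h_rankings_py tids h2h)

-- ===== LEMMAS AND PROOFS =====

-- canonical score dict: keys tids (assumed Nodup), value function g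
def pvMkS (tids : List Int) (g : Int → Int) : PySem.Dict Int Int :=
  PySem.Dict.mk (tids.map (fun t => (t, g t)))

theorem pvMkS_keys (tids : List Int) (g : Int → Int) :
    (pvMkS tids g).keys = tids := by
  simp only [pvMkS, PySem.Dict.keys, List.map_map]
  induction tids with
  | nil => rfl
  | cons a l ih => simp [ih]

theorem pvMkS_getD (tids : List Int) (g : Int → Int) (t : Int)
    (hnd : tids.Nodup) (ht : t ∈ tids) : (pvMkS tids g).getD t 0 = g t := by
  apply PySem.Dict.getD_of_mem_items
  · exact List.mem_map_of_mem ht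
  · rw [pvMkS_keys]; exact hnd

theorem pvMkS_insert (tids : List Int) (g : Int → Int) (k v : Int)
    (hk : k ∈ tids) :
    (pvMkS tids g).insert k v = pvMkS tids (fun t => if t = k then v else g t) := by
  have hc : (pvMkS tids g).contains k = true := by
    rw [PySem.Dict.contains_eq_decide_mem_keys, pvMkS_keys]; simp [hk]
  apply PySem.Dict.ext
  rw [PySem.Dict.items_insert_of_contains _ _ hc]
  show (tids.map (fun t => (t, g t))).map _ = _
  rw [List.map_map]
  apply List.map_congr_left
  intro t _
  by_cases h : t = k <;> simp [h]

theorem pvInit_eq (tids : List Int) (hnd : tids.Nodup) :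
    tids.foldl (fun d t => d.insert t 0) PySem.Dict.empty = pvMkS tids (fun _ => 0) := by
  apply PySem.Dict.ext
  rw [PySem.Dict.items_foldl_insert_fresh tids (fun t => t) (fun _ => (0 : Int)) PySem.Dict.empty
    (by intro a _; simp) (by simpa using hnd)]
  simp [pvMkS, PySem.Dict.empty]

-- look: the value rec.get(key, 0) through the optional lookup; 0 when absent or empty
def pvLook (h2h : List (Int × Int × List (String × Int))) (x y : Int) (k : String) : Int :=
  match pvH2hGet? h2h x y with
  | none => 0
  | some r => (PySem.Dict.mk r).getD k 0

theorem pvPointsFor_eq (a b : Int) (h2h : List (Int × Int × List (String × Int))) :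
    pvH2hPointsFor a b h2h = pvLook h2h a b "a_pts" + pvLook h2h b a "b_pts" := by
  unfold pvH2hPointsFor pvLook
  rcases h1 : pvH2hGet? h2h a b with _ | (_ | ⟨p1, r1⟩) <;>
    rcases h2 : pvH2hGet? h2h b a with _ | (_ | ⟨p2, r2⟩) <;>
    simp [PySem.Dict.getD, PySem.Dict.get?]

-- total A assigns to t (the inner-loop sum taken over the whole group)
def pvSA (tids : List Int) (h2h : List (Int × Int × List (String × Int))) (t : Int) : Int :=
  (tids.map (fun b => if t = b then 0 else pvH2hPointsFor t b h2h)).sum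

-- contribution of one h2h entry to team t in B
def pvContrib (tids : List Int) (t : Int) (e : Int × Int × List (String × Int)) : Int :=
  if e.1 ∈ tids ∧ e.2.1 ∈ tids ∧ e.1 ≠ e.2.1 then
    (if t = e.1 then (PySem.Dict.mk e.2.2).getD "a_pts" 0
     else if t = e.2.1 then (PySem.Dict.mk e.2.2).getD "b_pts" 0 else 0)
  else 0

def pvFB (tids : List Int) (h2h : List (Int × Int × List (String × Int))) (t : Int) : Int :=
  (h2h.map (pvContrib tids t)).sum

-- A's inner loop, to a pure update at key a
theorem pvInnerLoop (tids : List Int) (h2h : List (Int × Int × List (String × Int)))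
    (bl : List Int) (g : Int → Int) (a : Int) (hnd : tids.Nodup) (ha : a ∈ tids) :
    bl.foldl (fun sc b => if a = b then sc
        else sc.insert a (sc.getD a 0 + pvH2hPointsFor a b h2h)) (pvMkS tids g)
    = pvMkS tids (fun t => if t = a then
        g a + (bl.map (fun b => if a = b then 0 else pvH2hPointsFor a b h2h)).sum else g t) := by
  induction bl generalizing g with
  | nil =>
    simp only [List.foldl_nil, List.map_nil, List.sum_nil]
    congr 1; funext t; by_cases h : t = a <;> simp [h]
  | cons b bl ih =>
    simp only [List.foldl_cons, List.map_cons, List.sum_cons]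
    by_cases hab : a = b
    · rw [if_pos hab, ih g]
      congr 1; funext t; by_cases h : t = a <;> simp [h, hab]
    · rw [if_neg hab, pvMkS_getD tids g a hnd ha, pvMkS_insert tids g a _ ha, ih]
      congr 1; funext t; by_cases h : t = a <;> simp [h, hab, add_assoc]

-- A's outer loop over a duplicate-free sublist of the group
theorem pvOuterLoop (tids : List Int) (h2h : List (Int × Int × List (String × Int)))
    (al : List Int) (g : Int → Int) (hnd : tids.Nodup)
    (hsub : ∀ x ∈ al, x ∈ tids) (hal : al.Nodup) :
    al.foldl (fun sc a => tids.foldl (fun sc b => if a = b then sc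
        else sc.insert a (sc.getD a 0 + pvH2hPointsFor a b h2h)) sc) (pvMkS tids g)
    = pvMkS tids (fun t => if t ∈ al then g t + pvSA tids h2h t else g t) := by
  induction al generalizing g with
  | nil =>
    simp
  | cons a al ih =>
    rcases List.nodup_cons.mp hal with ⟨hna, hal'⟩
    have ha : a ∈ tids := hsub a (by simp)
    simp only [List.foldl_cons]
    rw [pvInnerLoop tids h2h tids g a hnd ha,
        ih _ (fun x hx => hsub x (List.mem_cons_of_mem _ hx)) hal']
    congr 1; funext t
    by_cases hta : t = a
    · subst hta
      simp [hna, pvSA]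
    · by_cases htl : t ∈ al <;> simp [hta, htl]

-- B's single pass, to a pure accumulation of per-entry contributions
theorem pvBLoop (tids : List Int) (l : List (Int × Int × List (String × Int)))
    (g : Int → Int) (hnd : tids.Nodup) :
    l.foldl (fun sc e =>
      if e.1 ∈ PySem.Set.ofList tids ∧ e.2.1 ∈ PySem.Set.ofList tids ∧ e.1 ≠ e.2.1 then
        (sc.insert e.1 (sc.getD e.1 0 + (PySem.Dict.mk e.2.2).getD "a_pts" 0)).insert e.2.1
          ((sc.insert e.1 (sc.getD e.1 0 + (PySem.Dict.mk e.2.2).getD "a_pts" 0)).getD e.2.1 0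
            + (PySem.Dict.mk e.2.2).getD "b_pts" 0)
      else sc) (pvMkS tids g)
    = pvMkS tids (fun t => g t + pvFB tids l t) := by
  induction l generalizing g with
  | nil =>
    simp only [List.foldl_nil, pvFB, List.map_nil, List.sum_nil]
    congr 1; funext t; simp
  | cons e l ih =>
    obtain ⟨x, y, r⟩ := e
    simp only [List.foldl_cons]
    by_cases hc : x ∈ tids ∧ y ∈ tids ∧ x ≠ y
    · obtain ⟨hx, hy, hxy⟩ := hc
      rw [if_pos (by simpa [PySem.Set.mem_ofList] using ⟨hx, hy, hxy⟩)]
      rw [pvMkS_getD tids g x hnd hx, pvMkS_insert tids g x _ hx]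
      rw [pvMkS_getD tids _ y hnd hy, pvMkS_insert tids _ y _ hy, ih]
      congr 1; funext t
      simp only [pvFB, List.map_cons, List.sum_cons, pvContrib, hx, hy]
      by_cases hty : t = y
      · subst hty; simp [Ne.symm hxy, hxy, add_assoc]
      · by_cases htx : t = x
        · subst htx; simp [hxy, add_assoc]
        · simp [htx, hty, hxy]
    · rw [if_neg (by simpa [PySem.Set.mem_ofList] using hc), ih]
      congr 1; funext t
      simp only [pvFB, List.map_cons, List.sum_cons, pvContrib]
      rw [if_neg hc]; simp

-- a lookup whose key pair is absent misses
theorem pvH2hGet?_none (h2h : List (Int × Int × List (String × Int))) (a b : Int)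
    (h : (a, b) ∉ h2h.map (fun e => (e.1, e.2.1))) : pvH2hGet? h2h a b = none := by
  induction h2h with
  | nil => rfl
  | cons e rest ih =>
    obtain ⟨x, y, r⟩ := e
    simp only [List.map_cons, List.mem_cons] at h
    rw [not_or] at h
    rw [pvH2hGet?]
    rw [if_neg (by rintro ⟨rfl, rfl⟩; exact h.1 rfl)]
    exact ih h.2

theorem pvSumZero {α : Type} (l : List α) (f : α → Int) (h : ∀ b ∈ l, f b = 0) :
    (l.map f).sum = 0 := by
  apply List.sum_eq_zero
  intro x hx
  obtain ⟨b, hb, rfl⟩ := List.mem_map.mp hx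
  exact h b hb

theorem pvSumSingle (l : List Int) (hl : l.Nodup) (y A : Int) :
    (l.map (fun b => if y = b then A else 0)).sum = if y ∈ l then A else 0 := by
  induction l with
  | nil => simp
  | cons a l ih =>
    rcases List.nodup_cons.mp hl with ⟨hna, hl'⟩
    simp only [List.map_cons, List.sum_cons, ih hl', List.mem_cons]
    by_cases hya : y = a
    · subst hya; simp [hna]
    · simp [hya]

-- the per-entry delta a head h2h record adds to A's sum equals B's contribution
theorem pvDelta (tids : List Int) (hnd : tids.Nodup) (t x y A B : Int) (ht : t ∈ tids) :
    (tids.map (fun b => if t = b then 0 else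
      (if x = t ∧ y = b then A else 0) + (if x = b ∧ y = t then B else 0))).sum
    = if x ∈ tids ∧ y ∈ tids ∧ x ≠ y then (if t = x then A else if t = y then B else 0)
      else 0 := by
  have hsplit : (tids.map (fun b => if t = b then 0 else
      (if x = t ∧ y = b then A else 0) + (if x = b ∧ y = t then B else 0))).sum
      = (tids.map (fun b => if t = b then 0 else (if x = t ∧ y = b then A else 0))).sum
      + (tids.map (fun b => if t = b then 0 else (if x = b ∧ y = t then B else 0))).sum := by
    rw [← PySem.List.sum_map_add_int]
    congr 1
    apply List.map_congr_left
    intro b _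
    by_cases h : t = b <;> simp [h]
  rw [hsplit]
  by_cases hxt : x = t
  · subst hxt
    by_cases hyt : y = x
    · subst hyt
      rw [pvSumZero _ _ (fun b _ => by by_cases h : y = b <;> simp [h]),
          pvSumZero _ _ (fun b _ => by by_cases h : y = b <;> simp [h])]
      simp
    · have h1 : (tids.map (fun b => if x = b then 0 else (if x = x ∧ y = b then A else 0))).sum
          = if y ∈ tids then A else 0 := by
        rw [show (fun b => if x = b then (0 : Int) else (if x = x ∧ y = b then A else 0))
            = (fun b => if y = b then A else 0) from funext fun b => by
          by_cases hb : x = b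
          · subst hb; simp [hyt]
          · simp [hb]]
        exact pvSumSingle tids hnd y A
      rw [h1, pvSumZero _ _ (fun b _ => by by_cases h : x = b <;> simp [h])]
      have hxy : x ≠ y := fun h => hyt h.symm
      by_cases hym : y ∈ tids <;> simp [ht, hym, hxy]
  · by_cases hyt : y = t
    · subst hyt
      have h2 : (tids.map (fun b => if y = b then 0 else (if x = b ∧ y = y then B else 0))).sum
          = if x ∈ tids then B else 0 := by
        rw [show (fun b => if y = b then (0 : Int) else (if x = b ∧ y = y then B else 0))
            = (fun b => if x = b then B else 0) from funext fun b => by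
          by_cases hb : y = b
          · subst hb; simp [hxt]
          · simp [hb]]
        exact pvSumSingle tids hnd x B
      rw [h2, pvSumZero _ _ (fun b _ => by by_cases h : y = b <;> simp [h, hxt])]
      by_cases hxm : x ∈ tids <;> simp [ht, hxm, hxt, Ne.symm hxt]
    · rw [pvSumZero _ _ (fun b _ => by by_cases h : t = b <;> simp [h, hxt]),
          pvSumZero _ _ (fun b _ => by by_cases h : t = b <;> simp [h, hyt])]
      simp [Ne.symm hxt, Ne.symm hyt]

theorem pvCore (tids : List Int) (h2h : List (Int × Int × List (String × Int)))
    (t : Int) (hnd : tids.Nodup) (hk : (h2h.map (fun e => (e.1, e.2.1))).Nodup)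
    (ht : t ∈ tids) : pvSA tids h2h t = pvFB tids h2h t := by
  have key : ∀ (h : List (Int × Int × List (String × Int))),
      (h.map (fun e => (e.1, e.2.1))).Nodup →
      (tids.map (fun b => if t = b then 0 else
        pvLook h t b "a_pts" + pvLook h b t "b_pts")).sum = pvFB tids h t := by
    intro h
    induction h with
    | nil =>
      intro _
      rw [pvSumZero _ _ (by intro b hb; by_cases hb' : t = b <;> simp [hb', pvLook, pvH2hGet?])]
      simp [pvFB]
    | cons e rest ih =>
      intro hnodup
      obtain ⟨x, y, r⟩ := e
      rcases List.nodup_cons.mp hnodup with ⟨hhead, hrest⟩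
      have hconsA : ∀ u v : Int, pvLook ((x, y, r) :: rest) u v "a_pts"
          = (if x = u ∧ y = v then (PySem.Dict.mk r).getD "a_pts" 0 else 0)
            + pvLook rest u v "a_pts" := by
        intro u v
        simp only [pvLook, pvH2hGet?]
        by_cases h : x = u ∧ y = v
        · obtain ⟨rfl, rfl⟩ := h
          rw [if_pos ⟨rfl, rfl⟩, if_pos ⟨rfl, rfl⟩]
          have : pvH2hGet? rest x y = none := pvH2hGet?_none rest x y hhead
          simp [this]
        · rw [if_neg h, if_neg h]; simp
      have hconsB : ∀ u v : Int, pvLook ((x, y, r) :: rest) u v "b_pts"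
          = (if x = u ∧ y = v then (PySem.Dict.mk r).getD "b_pts" 0 else 0)
            + pvLook rest u v "b_pts" := by
        intro u v
        simp only [pvLook, pvH2hGet?]
        by_cases h : x = u ∧ y = v
        · obtain ⟨rfl, rfl⟩ := h
          rw [if_pos ⟨rfl, rfl⟩, if_pos ⟨rfl, rfl⟩]
          have : pvH2hGet? rest x y = none := pvH2hGet?_none rest x y hhead
          simp [this]
        · rw [if_neg h, if_neg h]; simp
      have hbody : (fun b => if t = b then (0:Int) else
            pvLook ((x, y, r) :: rest) t b "a_pts" + pvLook ((x, y, r) :: rest) b t "b_pts")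
          = fun b => (if t = b then 0 else
              (if x = t ∧ y = b then (PySem.Dict.mk r).getD "a_pts" 0 else 0)
              + (if x = b ∧ y = t then (PySem.Dict.mk r).getD "b_pts" 0 else 0))
            + (if t = b then 0 else pvLook rest t b "a_pts" + pvLook rest b t "b_pts") := by
        funext b
        by_cases hb : t = b
        · simp [hb]
        · rw [if_neg hb, if_neg hb, if_neg hb, hconsA t b, hconsB b t]; ring
      rw [hbody, PySem.List.sum_map_add_int, ih hrest,
          pvDelta tids hnd t x y _ _ ht]
      simp only [pvFB, List.map_cons, List.sum_cons, pvContrib]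
  have : pvSA tids h2h t = (tids.map (fun b => if t = b then 0 else
      pvLook h2h t b "a_pts" + pvLook h2h b t "b_pts")).sum := by
    unfold pvSA
    congr 1
    apply List.map_congr_left
    intro b _
    by_cases hb : t = b <;> simp [hb, pvPointsFor_eq]
  rw [this, key h2h hk]

theorem pvMkS_items (tids : List Int) (g : Int → Int) :
    (pvMkS tids g).items = tids.map (fun t => (t, g t)) := rfl

-- re-storing a key's own value changes nothing
theorem pvInsertSelf (d : PySem.Dict Int Int) (k : Int) (hnd : d.keys.Nodup)
    (hc : d.contains k = true) : d.insert k (d.getD k 0) = d := by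
  apply PySem.Dict.ext
  rw [PySem.Dict.items_insert_of_contains _ _ hc]
  conv_rhs => rw [← List.map_id d.items]
  apply List.map_congr_left
  intro p hp
  by_cases h : p.1 = k
  · have : d.getD p.1 0 = p.2 := PySem.Dict.getD_of_mem_items d (by simpa using hp) hnd 0
    simp only [h] at this
    rw [this, h.symm]
    simp
  · simp [h]

theorem pvInitKeys (tids : List Int) :
    (tids.foldl (fun d t => d.insert t 0) (PySem.Dict.empty : PySem.Dict Int Int)).keys
      = PySem.Set.ofList tids := by
  rw [PySem.Dict.keys_foldl_insert]
  simp [PySem.Dict.keys_empty, PySem.Set.update_nil_left]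

theorem pvInitNodup (tids : List Int) :
    (tids.foldl (fun d t => d.insert t 0) (PySem.Dict.empty : PySem.Dict Int Int)).keys.Nodup :=
  PySem.Dict.nodup_keys_foldl_insert tids _ _ (by simp [PySem.Dict.keys_empty])

-- when no h2h entry pairs two distinct group members, every lookup A makes misses
theorem pvPts_zero (tids : List Int) (h2h : List (Int × Int × List (String × Int)))
    (hno : ∀ e ∈ h2h, ¬(e.1 ∈ tids ∧ e.2.1 ∈ tids ∧ e.1 ≠ e.2.1))
    (a b : Int) (ha : a ∈ tids) (hb : b ∈ tids) (hab : a ≠ b) :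
    pvH2hPointsFor a b h2h = 0 := by
  have hget : ∀ u v : Int, u ∈ tids → v ∈ tids → u ≠ v → pvH2hGet? h2h u v = none := by
    intro u v hu hv huv
    apply pvH2hGet?_none
    intro hmem
    obtain ⟨e, he, heq⟩ := List.mem_map.mp hmem
    exact hno e he (by
      have h1 : e.1 = u := congrArg Prod.fst heq
      have h2 : e.2.1 = v := congrArg Prod.snd heq
      exact ⟨h1 ▸ hu, h2 ▸ hv, by rw [h1, h2]; exact huv⟩)
  rw [pvPointsFor_eq]
  simp [pvLook, hget a b ha hb hab, hget b a hb ha (Ne.symm hab)]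

-- with no relevant h2h entry both loops leave the initial all-zero dict unchanged
theorem pvA_id (tids : List Int) (h2h : List (Int × Int × List (String × Int)))
    (hno : ∀ e ∈ h2h, ¬(e.1 ∈ tids ∧ e.2.1 ∈ tids ∧ e.1 ≠ e.2.1))
    (d : PySem.Dict Int Int) (hnd : d.keys.Nodup) (hks : ∀ t ∈ tids, d.contains t = true) :
    tids.foldl (fun sc a => tids.foldl (fun sc b => if a = b then sc
        else sc.insert a (sc.getD a 0 + pvH2hPointsFor a b h2h)) sc) d = d := by
  have hinner : ∀ a ∈ tids, ∀ bl : List Int, (∀ b ∈ bl, b ∈ tids) →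
      bl.foldl (fun sc b => if a = b then sc
        else sc.insert a (sc.getD a 0 + pvH2hPointsFor a b h2h)) d = d := by
    intro a ha bl
    induction bl with
    | nil => intro _; rfl
    | cons b bl ih =>
      intro hbl
      simp only [List.foldl_cons]
      by_cases hab : a = b
      · rw [if_pos hab]; exact ih (fun x hx => hbl x (List.mem_cons_of_mem _ hx))
      · rw [if_neg hab, pvPts_zero tids h2h hno a b ha (hbl b (by simp)) hab, add_zero,
            pvInsertSelf d a hnd (hks a ha)]
        exact ih (fun x hx => hbl x (List.mem_cons_of_mem _ hx))
  have houter : ∀ al : List Int, (∀ a ∈ al, a ∈ tids) →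
      al.foldl (fun sc a => tids.foldl (fun sc b => if a = b then sc
        else sc.insert a (sc.getD a 0 + pvH2hPointsFor a b h2h)) sc) d = d := by
    intro al
    induction al with
    | nil => intro _; rfl
    | cons a al ih =>
      intro hal
      simp only [List.foldl_cons]
      rw [hinner a (hal a (by simp)) tids (fun b hb => hb)]
      exact ih (fun x hx => hal x (List.mem_cons_of_mem _ hx))
  exact houter tids (fun a ha => ha)

theorem pvB_id (tids : List Int) (h2h : List (Int × Int × List (String × Int)))
    (hno : ∀ e ∈ h2h, ¬(e.1 ∈ tids ∧ e.2.1 ∈ tids ∧ e.1 ≠ e.2.1))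
    (d : PySem.Dict Int Int) :
    h2h.foldl (fun sc e =>
      if e.1 ∈ PySem.Set.ofList tids ∧ e.2.1 ∈ PySem.Set.ofList tids ∧ e.1 ≠ e.2.1 then
        (sc.insert e.1 (sc.getD e.1 0 + (PySem.Dict.mk e.2.2).getD "a_pts" 0)).insert e.2.1
          ((sc.insert e.1 (sc.getD e.1 0 + (PySem.Dict.mk e.2.2).getD "a_pts" 0)).getD e.2.1 0
            + (PySem.Dict.mk e.2.2).getD "b_pts" 0)
      else sc) d = d := by
  induction h2h generalizing d with
  | nil => rfl
  | cons e rest ih =>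
    simp only [List.foldl_cons]
    rw [if_neg (by
      simp only [PySem.Set.mem_ofList]
      exact hno e (by simp))]
    exact ih (fun x hx => hno x (List.mem_cons_of_mem _ hx)) d

-- ===== VERDICT (by name: the statement is the Claim_ definition above) =====
theorem group_h2h_rankings_py_spec : Claim_equal_group_h2h_rankings_py := by
  intro tids h2h _ hpre
  obtain ⟨hk, hnd | hno⟩ := hpre
  · show group_h2h_rankings_py tids h2h = group_h2h_rankings_py_alt tids h2h
    simp only [group_h2h_rankings_py, group_h2h_rankings_py_alt]
    rw [pvInit_eq tids hnd,
        pvOuterLoop tids h2h tids (fun _ => 0) hnd (fun x hx => hx) hnd,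
        pvBLoop tids h2h (fun _ => 0) hnd,
        pvMkS_items, pvMkS_items]
    apply List.map_congr_left
    intro t ht
    simp only [ht, if_pos, zero_add]
    rw [pvCore tids h2h t hnd hk ht]
  · show group_h2h_rankings_py tids h2h = group_h2h_rankings_py_alt tids h2h
    simp only [group_h2h_rankings_py, group_h2h_rankings_py_alt]
    rw [pvA_id tids h2h hno _ (pvInitNodup tids) (by
          intro t ht
          rw [PySem.Dict.contains_eq_decide_mem_keys, pvInitKeys]
          simp [PySem.Set.mem_ofList, ht]),
        pvB_id tids h2h hno]
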